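-- pv_equiv track=rewrite | github.com/GungIndi/openvpn-monitor | openvpn_monitor/util/dnsmasq_parser.py | group_by_ip
-- ===== SOURCE A (Python) =====
-- from collections import defaultdict
-- from typing import List, Dict, Optional
--
-- def group_by_ip(queries: List[Dict]) -> Dict[str, List[Dict]]:
--     """
--     Group DNS queries by client IP address
--
--     Args:
--         queries: List of query dictionaries
--
--     Returns:
--         Dict mapping client IP to list of queries
--     """
--     grouped = defaultdict(list)
--
--     for query in queries:
--         client_ip = query['client_ip']
--         grouped[client_ip].append(query)
--
--     # Sort queries within each IP by timestamp (most recent first)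
--     for ip in grouped:
--         grouped[ip] = sorted(
--             grouped[ip],
--             key=lambda q: q['timestamp'],
--             reverse=True
--         )
--
--     return dict(grouped)
-- ===== SOURCE B (Python) =====
-- def group_by_ip(queries):
--     """
--     Group DNS queries by client IP address
--
--     Args:
--         queries: List of query dictionaries
--
--     Returns:
--         Dict mapping client IP to list of queries
--     """
--     # One global stable sort (most recent first); each group is then the
--     # subsequence of the sorted list belonging to that IP, already in order.
--     ordered = sorted(queries, key=lambda q: q['timestamp'], reverse=True)
--     ips = dict.fromkeys(q['client_ip'] for q in queries)
--     return {ip: [q for q in ordered if q['client_ip'] == ip] for ip in ips}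
-- ===== Notes on version B (the rewrite author's own statement) =====
-- stated objective: alternative
-- what changed: B replaces per-bucket accumulation followed by a sort of every bucket with one global stable sort by timestamp and a per-IP filter of that sorted list (keys deduplicated in first-occurrence order), relying on sort stability for identical tie order.
import Mathlib
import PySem

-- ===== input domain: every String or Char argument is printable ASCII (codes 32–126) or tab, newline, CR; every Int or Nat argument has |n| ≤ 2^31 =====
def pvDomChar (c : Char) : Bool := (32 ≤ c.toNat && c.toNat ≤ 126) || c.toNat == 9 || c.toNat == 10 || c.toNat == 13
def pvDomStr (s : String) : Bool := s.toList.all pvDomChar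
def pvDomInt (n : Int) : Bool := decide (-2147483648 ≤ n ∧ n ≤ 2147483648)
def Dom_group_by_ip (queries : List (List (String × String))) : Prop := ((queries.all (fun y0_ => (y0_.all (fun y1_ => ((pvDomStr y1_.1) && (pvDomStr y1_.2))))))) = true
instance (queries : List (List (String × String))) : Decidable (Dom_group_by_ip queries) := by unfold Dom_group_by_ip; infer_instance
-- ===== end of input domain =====

-- B differs from A by one global stable sort + per-IP filter instead of per-bucket append + per-bucket sort (alternative decomposition, same results).

-- ===== PORT A =====
-- query['client_ip'] / query['timestamp']: first-match lookup; the KeyError case (missing key) is excluded by Pre_ below,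
-- so the "" default of this totalised lookup is never reached on admitted inputs.
def qget (q : List (String × String)) (k : String) : String :=
  ((PySem.Dict.mk q).get? k).getD ""

def cip (q : List (String × String)) : String := qget q "client_ip"

def tsk (q : List (String × String)) : String := qget q "timestamp"

def group_by_ip (queries : List (List (String × String))) : List (String × List (List (String × String))) :=
  let grouped : PySem.Dict String (List (List (String × String))) :=
    queries.foldl (fun d query => d.insert (cip query) (d.getD (cip query) [] ++ [query])) ⟨[]⟩
  grouped.items.map (fun kv => (kv.1, PySem.List.sorted kv.2 tsk true))

-- ===== PORT B =====
def group_by_ip_alt (queries : List (List (String × String))) : List (String × List (List (String × String))) :=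
  let ordered := PySem.List.sorted queries tsk true
  let ips := PySem.List.dedup (queries.map cip)
  ips.map (fun ip => (ip, ordered.filter (fun q => cip q == ip)))

-- ===== PRECONDITION & SPEC =====
-- Pre_ excludes exactly the inputs on which Python A raises KeyError: a query without a 'client_ip' or 'timestamp' key.
def Pre_group_by_ip (queries : List (List (String × String))) : Prop :=
  ∀ q ∈ queries, (PySem.Dict.mk q).contains "client_ip" = true ∧ (PySem.Dict.mk q).contains "timestamp" = true
instance (queries : List (List (String × String))) : Decidable (Pre_group_by_ip queries) := by unfold Pre_group_by_ip; infer_instance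

def pvWitness_group_by_ip : (List (List (String × String))) :=
  [[("client_ip", "10.0.0.1"), ("timestamp", "2021-01-01")], [("client_ip", "10.0.0.2"), ("timestamp", "2020-01-01"), ("query", "a.example")]]

def Spec_group_by_ip (queries : List (List (String × String))) (out : List (String × List (List (String × String)))) : Prop := out = group_by_ip_alt queries
instance (queries : List (List (String × String))) (out : List (String × List (List (String × String)))) : Decidable (Spec_group_by_ip queries out) := by unfold Spec_group_by_ip; infer_instance

-- ===== CLAIM (what is proved, stated in full; the proofs are below) =====
def Claim_equal_group_by_ip : Prop := ∀ (queries : List (List (String × String))), Dom_group_by_ip queries → Pre_group_by_ip queries → Spec_group_by_ip queries (group_by_ip queries)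

-- ===== LEMMAS AND PROOFS =====

-- abbreviations for the proofs
def pvB (x y : List (String × String)) : Bool := decide (tsk y < tsk x)

def pvR (a c : List (String × String)) : Prop := tsk c ≤ tsk a

def pvFilt (ip : String) (l : List (List (String × String))) : List (List (String × String)) :=
  l.filter (fun q => cip q == ip)

-- the shape A's grouping fold keeps: keys in first-occurrence order, each with its subsequence
def pvD (l : List (List (String × String))) : PySem.Dict String (List (List (String × String))) :=
  ⟨(PySem.List.dedup (l.map cip)).map (fun ip => (ip, pvFilt ip l))⟩

lemma pvFind_map {g : String → List (List (String × String))} {ips : List String} {ip : String}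
    (h : ip ∈ ips) :
    List.find? (fun p => p.1 == ip) (ips.map (fun i => (i, g i))) = some (ip, g ip) := by
  induction ips with
  | nil => cases h
  | cons a t ih =>
    by_cases ha : a = ip
    · subst ha; simp
    · have : ip ∈ t := by cases h with
        | head => exact absurd rfl ha
        | tail _ h => exact h
      simp [ha, ih this]

lemma pvFind_map_none {g : String → List (List (String × String))} {ips : List String} {ip : String}
    (h : ip ∉ ips) :
    List.find? (fun p => p.1 == ip) (ips.map (fun i => (i, g i))) = none := by
  induction ips with
  | nil => rfl
  | cons a t ih =>
    have ha : a ≠ ip := fun e => h (e ▸ List.mem_cons_self)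
    simp [ha, ih (fun hm => h (List.mem_cons_of_mem _ hm))]

lemma pvDedup_append (xs : List String) (x : String) :
    PySem.List.dedup (xs ++ [x]) = if x ∈ xs then PySem.List.dedup xs else PySem.List.dedup xs ++ [x] := by
  simp only [PySem.List.dedup, PySem.Set.ofList_eq_foldl, List.foldl_append, List.foldl_cons,
    List.foldl_nil, PySem.Set.add, PySem.Set.contains]
  rw [← PySem.Set.ofList_eq_foldl]
  by_cases h : x ∈ xs <;> simp [PySem.Set.mem_ofList, h]

lemma pvFilt_append (ip : String) (l : List (List (String × String))) (q : List (String × String)) :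
    pvFilt ip (l ++ [q]) = pvFilt ip l ++ if cip q = ip then [q] else [] := by
  simp only [pvFilt, List.filter_append, List.filter_cons, List.filter_nil]
  by_cases h : cip q = ip <;> simp [h]

lemma pvD_step (l : List (List (String × String))) (q : List (String × String)) :
    (pvD l).insert (cip q) ((pvD l).getD (cip q) [] ++ [q]) = pvD (l ++ [q]) := by
  by_cases hk : cip q ∈ l.map cip
  · -- the IP is already a key: insert overwrites in place, dedup is unchanged
    have hmem : cip q ∈ PySem.List.dedup (l.map cip) := by
      simpa [PySem.List.dedup, PySem.Set.mem_ofList] using hk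
    have hcont : (pvD l).contains (cip q) = true := by
      simp only [PySem.Dict.contains, pvD, List.any_map, List.any_eq_true]
      exact ⟨cip q, hmem, by simp⟩
    have hget : (pvD l).getD (cip q) [] = pvFilt (cip q) l := by
      simp only [PySem.Dict.getD, PySem.Dict.get?, pvD]
      rw [pvFind_map hmem]
      rfl
    have hD : pvD (l ++ [q])
        = ⟨(PySem.List.dedup (l.map cip)).map (fun i => (i, pvFilt i (l ++ [q])))⟩ := by
      simp only [pvD, List.map_append, List.map_cons, List.map_nil, pvDedup_append, hk, if_pos]
    rw [hget, hD]
    simp only [PySem.Dict.insert]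
    rw [if_pos hcont]
    simp only [pvD, List.map_map]
    congr 1
    apply List.map_congr_left
    intro i _
    simp only [Function.comp]
    by_cases hi : i = cip q
    · subst hi; simp [pvFilt_append]
    · have hne : (i == cip q) = false := by simp [hi]
      have hqi : ¬ cip q = i := fun h => hi (Eq.symm h)
      simp [hne, pvFilt_append, hqi]
  · -- new IP: insert appends the new pair, dedup gains the key at the end
    have hmem : cip q ∉ PySem.List.dedup (l.map cip) := by
      simpa [PySem.List.dedup, PySem.Set.mem_ofList] using hk
    have hcont : (pvD l).contains (cip q) = false := by
      simp only [PySem.Dict.contains, pvD, List.any_map, List.any_eq_false, Function.comp]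
      intro i hi
      exact fun e => hmem ((beq_iff_eq.mp e) ▸ hi)
    have hget : (pvD l).getD (cip q) [] = [] := by
      simp only [PySem.Dict.getD, PySem.Dict.get?, pvD]
      rw [pvFind_map_none hmem]
      rfl
    have hfilt : pvFilt (cip q) l = [] := by
      rw [pvFilt, List.filter_eq_nil_iff]
      intro a ha
      simp only [beq_iff_eq]
      exact fun e => hk (e ▸ List.mem_map_of_mem ha)
    have hD : pvD (l ++ [q])
        = ⟨(PySem.List.dedup (l.map cip)).map (fun i => (i, pvFilt i (l ++ [q])))
            ++ [(cip q, pvFilt (cip q) (l ++ [q]))]⟩ := by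
      simp only [pvD, List.map_append, List.map_cons, List.map_nil, pvDedup_append, hk, if_neg,
        not_false_iff]
    rw [hget, hD]
    simp only [PySem.Dict.insert]
    rw [if_neg (by simp [hcont])]
    simp only [pvD]
    congr 1
    congr 1
    · apply List.map_congr_left
      intro i hi
      have hil : i ∈ l.map cip := (PySem.Set.mem_ofList (l.map cip) i).mp hi
      have : ¬ (cip q = i) := fun e => hk (e ▸ hil)
      simp [pvFilt_append, this]
    · simp [pvFilt_append, hfilt]

lemma pvD_foldl (qs : List (List (String × String))) :
    ∀ l, qs.foldl (fun d query => d.insert (cip query) (d.getD (cip query) [] ++ [query])) (pvD l)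
      = pvD (l ++ qs) := by
  induction qs with
  | nil => intro l; simp
  | cons q t ih =>
    intro l
    rw [List.foldl_cons, pvD_step, ih (l ++ [q])]
    simp

lemma pvInsertBy_front (x : List (String × String)) (m : List (List (String × String)))
    (h : ∀ z ∈ m, tsk z < tsk x) : PySem.List.insertBy pvB x m = x :: m := by
  cases m with
  | nil => rfl
  | cons z zs => simp [PySem.List.insertBy, pvB, h z List.mem_cons_self]

lemma pvFilter_insertBy (p : List (String × String) → Bool) (x : List (String × String))
    (l : List (List (String × String))) (hl : l.Pairwise pvR) :
    (PySem.List.insertBy pvB x l).filter p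
      = if p x then PySem.List.insertBy pvB x (l.filter p) else l.filter p := by
  induction l with
  | nil =>
    by_cases hp : p x <;> simp [PySem.List.insertBy, hp]
  | cons y ys ih =>
    rcases List.pairwise_cons.mp hl with ⟨hy, hys⟩
    by_cases hb : tsk y < tsk x
    · have h1 : PySem.List.insertBy pvB x (y :: ys) = x :: y :: ys := by
        simp [PySem.List.insertBy, pvB, hb]
      rw [h1]
      by_cases hp : p x
      · rw [if_pos hp, List.filter_cons_of_pos hp]
        refine (pvInsertBy_front x _ ?_).symm
        intro z hz
        have hz' : z ∈ y :: ys := List.mem_of_mem_filter hz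
        cases hz' with
        | head => exact hb
        | tail _ h => exact lt_of_le_of_lt (hy z h) hb
      · simp [List.filter_cons, hp]
    · have h1 : PySem.List.insertBy pvB x (y :: ys) = y :: PySem.List.insertBy pvB x ys := by
        simp [PySem.List.insertBy, pvB, hb]
      rw [h1]
      simp only [List.filter_cons]
      rw [ih hys]
      by_cases hp : p x
      · by_cases hpy : p y
        · simp [hp, hpy, PySem.List.insertBy, pvB, hb]
        · simp [hp, hpy]
      · by_cases hpy : p y <;> simp [hp, hpy]

lemma pvPairwise_insertBy (x : List (String × String)) (l : List (List (String × String)))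
    (hl : l.Pairwise pvR) : (PySem.List.insertBy pvB x l).Pairwise pvR := by
  induction l with
  | nil => simp [PySem.List.insertBy, pvR]
  | cons y ys ih =>
    rcases List.pairwise_cons.mp hl with ⟨hy, hys⟩
    by_cases hb : tsk y < tsk x
    · have h1 : PySem.List.insertBy pvB x (y :: ys) = x :: y :: ys := by
        simp [PySem.List.insertBy, pvB, hb]
      rw [h1]
      refine List.Pairwise.cons ?_ hl
      intro z hz
      cases hz with
      | head => exact le_of_lt hb
      | tail _ h => exact le_trans (hy z h) (le_of_lt hb)
    · have h1 : PySem.List.insertBy pvB x (y :: ys) = y :: PySem.List.insertBy pvB x ys := by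
        simp [PySem.List.insertBy, pvB, hb]
      rw [h1]
      refine List.Pairwise.cons ?_ (ih hys)
      intro z hz
      rw [PySem.List.mem_insertBy] at hz
      cases hz with
      | inl h => exact h ▸ le_of_not_gt hb
      | inr h => exact hy z h

lemma pvFilter_foldl (p : List (String × String) → Bool) (qs : List (List (String × String))) :
    ∀ acc, acc.Pairwise pvR →
      (qs.foldl (fun a x => PySem.List.insertBy pvB x a) acc).filter p
        = (qs.filter p).foldl (fun a x => PySem.List.insertBy pvB x a) (acc.filter p) := by
  induction qs with
  | nil => intro acc _; simp
  | cons q t ih =>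
    intro acc hacc
    simp only [List.foldl_cons, List.filter_cons]
    rw [ih _ (pvPairwise_insertBy q acc hacc), pvFilter_insertBy p q acc hacc]
    by_cases hp : p q = true
    · simp [hp]
    · simp [hp]

lemma pvSorted_filter (p : List (String × String) → Bool) (xs : List (List (String × String))) :
    (PySem.List.sorted xs tsk true).filter p = PySem.List.sorted (xs.filter p) tsk true := by
  rw [PySem.List.sorted_rev_eq_foldl_insertBy, PySem.List.sorted_rev_eq_foldl_insertBy]
  have := pvFilter_foldl p xs [] List.Pairwise.nil
  exact this

-- ===== VERDICT (by name: the statement is the Claim_ definition above) =====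
theorem group_by_ip_spec : Claim_equal_group_by_ip := by
  intro queries _ _
  unfold Spec_group_by_ip group_by_ip group_by_ip_alt
  have h1 : queries.foldl (fun d query => d.insert (cip query) (d.getD (cip query) [] ++ [query]))
      (⟨[]⟩ : PySem.Dict String (List (List (String × String)))) = pvD queries := by
    have h0 : (⟨[]⟩ : PySem.Dict String (List (List (String × String)))) = pvD [] := rfl
    rw [h0, pvD_foldl]; simp
  rw [h1]
  simp only [pvD, List.map_map]
  apply List.map_congr_left
  intro ip _
  simp only [Function.comp]
  rw [show pvFilt ip queries = queries.filter (fun q => cip q == ip) from rfl]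
  rw [← pvSorted_filter]
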